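-- pv_equiv track=rewrite | github.com/alexandraback/datacollection | solutions_5688567749672960_1/Python/thomasahle/a.py | f
-- ===== SOURCE A (Python) =====
-- def f(n):
--     if n < 20:
--         return n
--     s = str(n)
--     l = len(s)
--     if s[-1] != '0':
--         ps = (s[:l//2] + (l-l//2-1)*'0' + '1')
--         p, pinv = int(ps), int(ps[::-1])
--         if pinv != p:
--             return f(pinv) + n-p + 1
--         elif n == pinv:
--             return f(n-1) + 1
--         else:
--             return f(pinv) + n-p
--     return f(n-1)+1
-- ===== SOURCE B (Python) =====
-- def _step(n):
--     # one collapse step for n >= 20: returns (delta, next_n)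
--     s = str(n)
--     if s[-1] == '0':
--         return 1, n - 1
--     l = len(s)
--     h = l - l // 2
--     rs = '1' + '0' * (h - 1) + s[:l//2][::-1]
--     pinv = int(rs)
--     p = int(rs[::-1])
--     if p == pinv:
--         if n == pinv:
--             return 1, n - 1
--         return n - p, pinv
--     return n - p + 1, pinv
--
-- def f(n):
--     total = 0
--     while n >= 20:
--         d, n = _step(n)
--         total += d
--     return n + total
-- ===== Notes on version B (the rewrite author's own statement) =====
-- stated objective: alternative
-- what changed: Replaced A's top-down recursion by a step function that returns a (delta, next_n) pair -- building the reversed pattern string directly and recovering p by reversing it, with condensed branch logic -- driven by a while loop with an additive accumulator.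
import Mathlib
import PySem

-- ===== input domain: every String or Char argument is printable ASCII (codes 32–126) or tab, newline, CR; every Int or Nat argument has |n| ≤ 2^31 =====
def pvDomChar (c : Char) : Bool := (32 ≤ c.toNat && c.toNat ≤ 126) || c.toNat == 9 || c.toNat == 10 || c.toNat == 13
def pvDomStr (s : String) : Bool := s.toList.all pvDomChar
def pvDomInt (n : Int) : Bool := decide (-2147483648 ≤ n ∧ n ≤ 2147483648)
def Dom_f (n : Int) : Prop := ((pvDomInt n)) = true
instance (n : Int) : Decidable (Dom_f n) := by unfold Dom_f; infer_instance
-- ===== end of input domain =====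

-- B replaces A's top-down recursion by a step function returning (delta, next_n) plus a
-- while-loop driver with an additive accumulator; the step builds the reversed pattern
-- string directly and obtains p by reversing it (objective: alternative decomposition).
-- Both ports use a fuel counter (n.toNat) solely to make the recursion/loop total.

-- ===== PORT A =====
-- literal transliteration of A; fuel only makes the recursion structural
def fA : Nat → Int → Int
  | 0, n => n
  | fuel+1, n =>
    if n < 20 then n
    else
      let s := PySem.Int.toChars n
      let l := PySem.List.len s
      if PySem.List.pyGet? s (-1) ≠ some '0' then
        let ps := PySem.List.slice s none (some (PySem.Int.floordiv l 2))
                    ++ PySem.List.pyRepeat ['0'] (l - PySem.Int.floordiv l 2 - 1) ++ ['1']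
        let p := (PySem.Int.ofChars? ps).getD 0
        let pinv := (PySem.Int.ofChars? ((PySem.List.slice? ps none none (-1)).getD [])).getD 0
        if pinv ≠ p then fA fuel pinv + n - p + 1
        else if n = pinv then fA fuel (n - 1) + 1
        else fA fuel pinv + (n - p)
      else fA fuel (n - 1) + 1

def f (n : Int) : Int := fA n.toNat n

-- ===== PORT B =====
-- literal transliteration of Source B's _step: returns (delta, next_n)
def stepB (n : Int) : Int × Int :=
  let s := PySem.Int.toChars n
  if PySem.List.pyGet? s (-1) = some '0' then (1, n - 1)
  else
    let l := PySem.List.len s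
    let h := l - PySem.Int.floordiv l 2
    -- '1' + '0'*(h-1) + s[:l//2][::-1]
    let rs := '1' :: (PySem.List.pyRepeat ['0'] (h - 1)
                ++ ((PySem.List.slice? (PySem.List.slice s none (some (PySem.Int.floordiv l 2)))
                      none none (-1)).getD []))
    let pinv := (PySem.Int.ofChars? rs).getD 0
    let p := (PySem.Int.ofChars? ((PySem.List.slice? rs none none (-1)).getD [])).getD 0
    if p = pinv then
      if n = pinv then (1, n - 1) else (n - p, pinv)
    else (n - p + 1, pinv)

-- literal transliteration of Source B's while loop; total is the Python accumulator
def fB : Nat → Int → Int → Int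
  | 0, n, total => n + total
  | fuel+1, n, total =>
    if n < 20 then n + total
    else
      let r := stepB n
      fB fuel r.2 (total + r.1)

def f_alt (n : Int) : Int := fB n.toNat n 0

-- ===== PRECONDITION & SPEC =====
def Spec_f (n : Int) (out : Int) : Prop := out = f_alt n
instance (n : Int) (out : Int) : Decidable (Spec_f n out) := by unfold Spec_f; infer_instance

-- ===== CLAIM (what is proved, stated in full; the proofs are below) =====
def Claim_equal_f : Prop := ∀ (n : Int), Dom_f n → Spec_f n (f n)

-- ===== LEMMAS AND PROOFS =====

-- one step of A's recursion is stepB: same delta, same next argument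
theorem fA_step (fuel : Nat) (n : Int) (h : ¬ n < 20) :
    fA (fuel+1) n = fA fuel (stepB n).2 + (stepB n).1 := by
  simp only [fA, stepB, if_neg h]
  by_cases h0 : PySem.List.pyGet? (PySem.Int.toChars n) (-1) = some '0'
  · simp [h0]
  · simp only [h0, ne_eq, not_false_eq_true, if_pos]
    rw [PySem.List.slice?_none_none_neg_one, PySem.List.slice?_none_none_neg_one,
        PySem.List.slice?_none_none_neg_one]
    simp only [Option.getD_some, List.reverse_append, List.reverse_cons,
      List.reverse_nil, List.nil_append, List.reverse_reverse,
      PySem.List.pyRepeat_singleton, List.reverse_replicate, List.append_assoc,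
      List.cons_append]
    set s := PySem.Int.toChars n with hs
    set l := PySem.List.len s with hl
    set d := PySem.Int.floordiv l 2 with hd
    set head := PySem.List.slice s none (some d) with hhead
    set z := List.replicate (l - d - 1).toNat '0' with hz
    set P := (PySem.Int.ofChars? (head ++ (z ++ ['1']))).getD 0 with hP
    set Q := (PySem.Int.ofChars? ('1' :: (z ++ head.reverse))).getD 0 with hQ
    set X := fA fuel Q with hX
    set Y := fA fuel (n - 1) with hY
    split_ifs <;> dsimp only <;> simp only [← hP, ← hQ] at * <;> omega

-- loop invariant: the driver computes A's recursion plus the accumulator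
theorem fB_eq_fA (fuel : Nat) : ∀ (n total : Int), fB fuel n total = fA fuel n + total := by
  induction fuel with
  | zero => intro n total; simp [fA, fB]
  | succ fuel ih =>
    intro n total
    by_cases h : n < 20
    · simp [fA, fB, h]
    · rw [show fB (fuel+1) n total = fB fuel (stepB n).2 (total + (stepB n).1) by
        simp [fB, h]]
      rw [ih, fA_step fuel n h]; ring

-- ===== VERDICT (by name: the statement is the Claim_ definition above) =====
theorem f_spec : Claim_equal_f := by
  intro n _
  unfold Spec_f f f_alt
  rw [fB_eq_fA, add_zero]
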